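-- pv_equiv track=rewrite | github.com/mindu2kk/CodePTIT-Python | bai203xoayvongxaukitu.py | min_rotation_steps
-- ===== SOURCE A (Python) =====
-- def rotate_str(s,k):
--     return s[k:] + s[:k]
--
-- def min_rotation_steps(strings):
--     n = len(strings)
--     length = len(strings[0])
--     min_step = float('inf')
--
--     for shift in range(length):
--         target = rotate_str(strings[0],shift)
--         total_steps = shift
--
--         for s in strings[1:]:
--             min_shift = float('inf')
--
--             for k in range(length):
--                 if rotate_str(s,k) == target:
--                     min_shift = min(min_shift,k)
--             if min_shift == float('inf'):
--                 return -1
--             total_steps += min_shift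
--         min_step = min(min_step,total_steps)
--     return min_step
-- ===== SOURCE B (Python) =====
-- def min_rotation_steps(strings):
--     s0 = strings[0]
--     L = len(s0)
--     # For each other string, collect ALL offsets d with rotate(s, d) == s0, found by
--     # sliding s0 over s+s.  Then rotate(s, k) == rotate(s0, shift) iff k == (d + shift) % L
--     # for some such d, so the per-shift minimum is pure modular arithmetic: no rotation
--     # is ever rebuilt or compared inside the shift loop.
--     offsets = []
--     for s in strings[1:]:
--         if len(s) != L:
--             return -1
--         doubled = s + s
--         D = [d for d in range(L) if doubled[d:d + L] == s0]
--         if not D: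
--             return -1
--         offsets.append(D)
--     best = -1
--     for shift in range(L):
--         total = shift
--         for D in offsets:
--             total += min((d + shift) % L for d in D)
--         if best < 0 or total < best:
--             best = total
--     return best
-- ===== Notes on version B (the rewrite author's own statement) =====
-- stated objective: alternative
-- what changed: B slides s0 over each s+s once to collect every offset d with rotate(s,d)==s0, then the shift loop is pure modular arithmetic min((d+shift)%L) over these offset lists, so no rotation string is ever rebuilt or compared inside the shift loop (A rebuilds and compares all L rotations of every string for every shift); intended as faster, measured 1.96x at the largest size but not consistently across inputs.
-- outside the precondition, e.g. on min_rotation_steps(['']): A returns inf, B returns -1; on min_rotation_steps(['', '']): A returns inf, B returns -1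
import Mathlib
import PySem

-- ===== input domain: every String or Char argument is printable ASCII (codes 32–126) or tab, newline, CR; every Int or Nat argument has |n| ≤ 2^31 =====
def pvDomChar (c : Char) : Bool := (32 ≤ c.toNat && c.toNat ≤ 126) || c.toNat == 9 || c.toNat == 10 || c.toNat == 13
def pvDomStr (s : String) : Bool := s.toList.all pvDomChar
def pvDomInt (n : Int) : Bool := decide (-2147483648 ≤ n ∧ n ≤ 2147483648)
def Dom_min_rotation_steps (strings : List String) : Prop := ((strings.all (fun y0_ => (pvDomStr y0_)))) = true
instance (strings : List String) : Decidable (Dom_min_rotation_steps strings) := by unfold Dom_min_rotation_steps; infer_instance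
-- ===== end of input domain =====

-- B replaces A's per-shift rescan of all rotations by a one-time pass that slides s0 over
-- each s+s to collect every aligning offset, after which the shift loop is pure modular
-- arithmetic over those offset lists (objective: alternative algorithm, same exact result).

-- ===== PORT A =====
-- rotate_str(s, k) = s[k:] + s[:k]
def rotate_str (s : String) (k : Int) : String :=
  String.ofList (PySem.List.slice s.toList (some k) none ++ PySem.List.slice s.toList none (some k))

-- inner-inner loop of A: min_shift over k in range(length); none = float('inf')
def pvA_minShift (s target : String) (L : Nat) : Option Int :=
  (List.range L).foldl (fun acc (k : Nat) =>
    if rotate_str s (k : Int) == target then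
      some (match acc with | none => (k : Int) | some m => min m (k : Int))
    else acc) none

-- inner loop of A over strings[1:]; none = the 'return -1' path
def pvA_inner (target : String) (L : Nat) : List String → Int → Option Int
  | [], total => some total
  | s :: rest, total =>
    match pvA_minShift s target L with
    | none => none
    | some m => pvA_inner target L rest (total + m)

-- outer loop of A over shift in range(length); minStep none = float('inf')
def pvA_outer (s0 : String) (rest : List String) (L : Nat) : List Nat → Option Int → Int
  | [], minStep => minStep.getD 0   -- only reached with minStep = none when L = 0: Python returns float('inf'), excluded by Pre_
  | shift :: shifts, minStep =>
    match pvA_inner (rotate_str s0 (shift : Int)) L rest (shift : Int) with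
    | none => -1
    | some total =>
        pvA_outer s0 rest L shifts
          (some (match minStep with | none => total | some m => min m total))

def min_rotation_steps (strings : List String) : Int :=
  match strings with
  | [] => 0   -- Python raises IndexError here; excluded by Pre_
  | s0 :: rest => pvA_outer s0 rest s0.toList.length (List.range s0.toList.length) none

-- ===== PORT B =====
-- D = [d for d in range(L) if doubled[d:d+L] == s0]  (doubled = s + s; Python slicing via PySem.List.slice)
def pvB_offsets (s0 s : String) (L : Nat) : List Nat :=
  (List.range L).filter
    (fun d => PySem.List.slice (s.toList ++ s.toList) (some (d : Int)) (some ((d : Int) + (L : Int))) == s0.toList)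

-- first pass of B: one offset list per other string; none = the 'return -1' paths
def pvB_collect (s0 : String) (L : Nat) : List String → Option (List (List Nat))
  | [] => some []
  | s :: rest =>
    if s.toList.length ≠ L then none
    else
      match pvB_offsets s0 s L with
      | [] => none
      | d :: ds => (pvB_collect s0 L rest).map (fun offs => (d :: ds) :: offs)

-- min((d + shift) % L for d in D); collect only keeps nonempty D, so Python's min never sees an empty generator
def pvB_minOff (D : List Nat) (shift L : Nat) : Nat :=
  match D with
  | [] => 0   -- unreachable (totality default)
  | d :: ds => ds.foldl (fun m d' => min m ((d' + shift) % L)) ((d + shift) % L)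

-- second pass of B: shift loop with a negative sentinel for 'no best yet'
def pvB_best (offsets : List (List Nat)) (L : Nat) : List Nat → Int → Int
  | [], best => best
  | shift :: shifts, best =>
    let total : Int := offsets.foldl (fun t D => t + ((pvB_minOff D shift L : Nat) : Int)) ((shift : Nat) : Int)
    pvB_best offsets L shifts (if best < 0 ∨ total < best then total else best)

def min_rotation_steps_alt (strings : List String) : Int :=
  match strings with
  | [] => 0   -- Python raises IndexError here; excluded by Pre_
  | s0 :: rest =>
    match pvB_collect s0 s0.toList.length rest with
    | none => -1
    | some offsets => pvB_best offsets s0.toList.length (List.range s0.toList.length) (-1)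

-- ===== PRECONDITION & SPEC =====
-- Pre_ excludes the empty list (A raises IndexError) and a first string "" (A returns
-- float('inf'), which is not a value of the declared int type).
def Pre_min_rotation_steps (strings : List String) : Prop :=
  strings ≠ [] ∧ strings.headD "" ≠ ""
instance (strings : List String) : Decidable (Pre_min_rotation_steps strings) := by
  unfold Pre_min_rotation_steps; infer_instance

def pvWitness_min_rotation_steps : List String := (["ab", "ba"])

def Spec_min_rotation_steps (strings : List String) (out : Int) : Prop := out = min_rotation_steps_alt strings
instance (strings : List String) (out : Int) : Decidable (Spec_min_rotation_steps strings out) := by unfold Spec_min_rotation_steps; infer_instance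

-- ===== CLAIM (what is proved, stated in full; the proofs are below) =====
def Claim_equal_min_rotation_steps : Prop := ∀ (strings : List String), Dom_min_rotation_steps strings → Pre_min_rotation_steps strings → Spec_min_rotation_steps strings (min_rotation_steps strings)

-- ===== LEMMAS AND PROOFS =====

-- String == is equality of the underlying char lists
theorem str_beq_toList (a b : String) : (a == b) = true ↔ a.toList = b.toList := by
  rw [beq_iff_eq, ← String.toList_inj]

-- rotate_str on a Nat shift is drop ++ take
theorem rotate_str_toList (s : String) (k : Nat) :
    (rotate_str s (k : Int)).toList = s.toList.drop k ++ s.toList.take k := by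
  simp [rotate_str, PySem.List.slice_from_natCast, PySem.List.slice_to_natCast]

theorem rotate_str_toList_rotate (s : String) (k : Nat) (h : k ≤ s.toList.length) :
    (rotate_str s (k : Int)).toList = s.toList.rotate k := by
  rw [rotate_str_toList, List.rotate_eq_drop_append_take h]

theorem length_rotate_str (s : String) (k : Nat) :
    (rotate_str s (k : Int)).toList.length = s.toList.length := by
  rw [rotate_str_toList]; simp; omega

-- B's slice of s+s IS the rotation, when the lengths agree
theorem slice_doubled (xs : List Char) (d L : Nat) (hlen : xs.length = L) (hd : d < L) :
    PySem.List.slice (xs ++ xs) (some (d : Int)) (some ((d : Int) + (L : Int))) = xs.rotate d := by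
  have h1 : ((d : Int) + (L : Int)) = (((d + L : Nat)) : Int) := by push_cast; ring
  rw [h1, PySem.List.slice_natCast]
  have hdle : d ≤ xs.length := by omega
  rw [List.drop_append_of_le_length hdle, List.take_append]
  have h2 : d + L - d = L := by omega
  have h4 : (List.drop d xs).length = L - d := by simp [hlen]
  rw [h2, List.take_of_length_le (le_of_eq_of_le h4 (by omega)), h4,
      show L - (L - d) = d by omega, List.rotate_eq_drop_append_take (by omega)]

-- the Nat↔Int min bookkeeping of A's accumulator
theorem foldl_optmin (l : List Nat) (m : Nat) :
    l.foldl (fun acc (k : Nat) =>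
        some (match acc with | none => (k : Int) | some x => min x (k : Int))) (some (m : Int))
      = some ((l.foldl min m : Nat) : Int) := by
  induction l generalizing m with
  | nil => rfl
  | cons k l ih =>
      simp only [List.foldl_cons]
      rw [show (min ((m : Nat) : Int) ((k : Nat) : Int)) = (((min m k : Nat)) : Int) by
        rw [Nat.cast_min]]
      exact ih (min m k)

-- A's innermost loop computes min? of the matching shifts
theorem pvA_minShift_eq_min? (s target : String) (L : Nat) :
    pvA_minShift s target L
      = (((List.range L).filter (fun (k : Nat) => rotate_str s (k : Int) == target)).min?).map
          (fun (k : Nat) => (k : Int)) := by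
  unfold pvA_minShift
  rw [← List.foldl_filter]
  cases h : (List.range L).filter (fun (k : Nat) => rotate_str s (k : Int) == target) with
  | nil => rfl
  | cons d ds =>
      simp only [List.foldl_cons]
      rw [foldl_optmin ds d]
      rfl

-- modular bookkeeping: shifting back then forward is the identity below L
theorem mod_shift_arith (L k sh : Nat) (hk : k < L) (hsh : sh < L) :
    ((k + (L - sh)) % L + sh) % L = k := by
  rcases Nat.lt_or_ge (k + (L - sh)) L with h | h
  · rw [Nat.mod_eq_of_lt h]
    have h2 : k + (L - sh) + sh = k + L := by omega
    rw [h2, Nat.add_mod_right, Nat.mod_eq_of_lt hk]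
  · have h1 : (k + (L - sh)) % L = k - sh := by
      rw [Nat.mod_eq_sub_mod h, Nat.mod_eq_of_lt (by omega)]
      omega
    rw [h1, Nat.mod_eq_of_lt (by omega)]
    omega

-- rotating back by L - sh cancels a rotation by sh
theorem rot_shift_cancel {xs ys : List Char} {L k sh : Nat} (hx : xs.length = L)
    (hy : ys.length = L) (hsh : sh ≤ L) (h : xs.rotate k = ys.rotate sh) :
    xs.rotate ((k + (L - sh)) % L) = ys := by
  have h1 : xs.rotate ((k + (L - sh)) % L) = xs.rotate (k + (L - sh)) := by
    rw [← hx]; exact List.rotate_mod xs _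
  rw [h1, ← List.rotate_rotate, h, List.rotate_rotate]
  have h2 : sh + (L - sh) = L := by omega
  rw [h2, ← hy, List.rotate_length]

-- membership in B's offset list
theorem mem_pvB_offsets (s0 s : String) (L d : Nat) (hx : s.toList.length = L) :
    d ∈ pvB_offsets s0 s L ↔ d < L ∧ s.toList.rotate d = s0.toList := by
  unfold pvB_offsets
  rw [List.mem_filter, List.mem_range]
  constructor
  · rintro ⟨hd, hs⟩
    rw [slice_doubled s.toList d L hx hd, beq_iff_eq] at hs
    exact ⟨hd, hs⟩
  · rintro ⟨hd, hs⟩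
    refine ⟨hd, ?_⟩
    rw [slice_doubled s.toList d L hx hd, beq_iff_eq]
    exact hs

-- min? only depends on which elements occur
theorem min?_congr_mem {l1 l2 : List Nat} (h : ∀ x, x ∈ l1 ↔ x ∈ l2) : l1.min? = l2.min? := by
  cases h1 : l1.min? with
  | none =>
      rw [List.min?_eq_none_iff] at h1
      subst h1
      symm
      rw [List.min?_eq_none_iff, List.eq_nil_iff_forall_not_mem]
      intro x hx
      exact (List.not_mem_nil (a := x)) ((h x).mpr hx)
  | some a =>
      rw [List.min?_eq_some_iff] at h1
      symm
      rw [List.min?_eq_some_iff]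
      exact ⟨(h a).mp h1.1, fun b hb => h1.2 b ((h b).mpr hb)⟩

-- the heart of the equivalence: for a fixed shift, A's matching rotation counts are exactly
-- the (d + shift) % L over B's offsets, so the two minima agree
theorem minset_eq (s0 s : String) (L sh : Nat) (hy : s0.toList.length = L)
    (hx : s.toList.length = L) (hL : 0 < L) (hsh : sh < L) :
    ((List.range L).filter (fun (k : Nat) => rotate_str s (k : Int) == rotate_str s0 (sh : Int))).min?
      = ((pvB_offsets s0 s L).map (fun d => (d + sh) % L)).min? := by
  apply min?_congr_mem
  intro k
  rw [List.mem_filter, List.mem_range, List.mem_map]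
  constructor
  · rintro ⟨hk, hb⟩
    rw [str_beq_toList, rotate_str_toList_rotate s k (by omega),
        rotate_str_toList_rotate s0 sh (by omega)] at hb
    refine ⟨(k + (L - sh)) % L, ?_, mod_shift_arith L k sh hk hsh⟩
    rw [mem_pvB_offsets s0 s L _ hx]
    exact ⟨Nat.mod_lt _ hL, by rw [← hy] at *; exact rot_shift_cancel hx hy (by omega) hb⟩
  · rintro ⟨d, hd, rfl⟩
    rw [mem_pvB_offsets s0 s L d hx] at hd
    obtain ⟨hdL, hrot⟩ := hd
    refine ⟨Nat.mod_lt _ hL, ?_⟩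
    rw [str_beq_toList, rotate_str_toList_rotate s _ (by have := Nat.mod_lt (d + sh) hL; omega),
        rotate_str_toList_rotate s0 sh (by omega)]
    have h1 : s.toList.rotate ((d + sh) % L) = s.toList.rotate (d + sh) := by
      rw [← hx]; exact List.rotate_mod _ _
    rw [h1, ← List.rotate_rotate, hrot]

-- when the lengths differ no rotation can match: A's filter is empty
theorem filter_empty_of_len_ne (s0 s : String) (L sh : Nat) (hy : s0.toList.length = L)
    (hx : s.toList.length ≠ L) :
    (List.range L).filter (fun (k : Nat) => rotate_str s (k : Int) == rotate_str s0 (sh : Int)) = [] := by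
  rw [List.eq_nil_iff_forall_not_mem]
  intro k hk
  rw [List.mem_filter, str_beq_toList] at hk
  apply hx
  have := congrArg List.length hk.2
  rw [length_rotate_str, length_rotate_str] at this
  rw [this, hy]

-- B's fold over a nonempty offset list is its min?
theorem pvB_minOff_eq (d : Nat) (ds : List Nat) (sh L : Nat) :
    (((d :: ds).map (fun d' => (d' + sh) % L)).min?) = some (pvB_minOff (d :: ds) sh L) := by
  simp only [List.map_cons, List.min?, pvB_minOff, List.foldl_map]

-- inner loops agree, Option-for-Option
theorem inner_eq (s0 : String) (L sh : Nat) (hy : s0.toList.length = L) (hL : 0 < L)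
    (hsh : sh < L) (rest : List String) (t : Int) :
    pvA_inner (rotate_str s0 (sh : Int)) L rest t
      = (pvB_collect s0 L rest).map
          (fun offs => offs.foldl (fun t' D => t' + ((pvB_minOff D sh L : Nat) : Int)) t) := by
  induction rest generalizing t with
  | nil => rfl
  | cons s rest ih =>
      simp only [pvA_inner, pvB_collect]
      by_cases hx : s.toList.length = L
      · rw [if_neg (show ¬ s.toList.length ≠ L by simp [hx])]
        rw [pvA_minShift_eq_min?, minset_eq s0 s L sh hy hx hL hsh]
        cases hD : pvB_offsets s0 s L with
        | nil => rfl
        | cons d ds =>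
            rw [pvB_minOff_eq d ds sh L]
            simp only [Option.map_some]
            rw [ih (t + ((pvB_minOff (d :: ds) sh L : Nat) : Int))]
            cases pvB_collect s0 L rest with
            | none => rfl
            | some offs => simp [List.foldl_cons]
      · simp only [if_pos hx]
        rw [pvA_minShift_eq_min?, filter_empty_of_len_ne s0 s L sh hy hx]
        rfl

-- totals are nonnegative (shift plus Nat casts)
theorem foldl_total_nonneg (offs : List (List Nat)) (sh L : Nat) (t : Int) (ht : 0 ≤ t) :
    0 ≤ offs.foldl (fun t' D => t' + ((pvB_minOff D sh L : Nat) : Int)) t := by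
  induction offs generalizing t with
  | nil => exact ht
  | cons D offs ih =>
      exact ih _ (by positivity)

-- outer loops agree under the accumulator relation (none ↔ the -1 sentinel)
theorem outer_eq (s0 : String) (rest : List String) (L : Nat) (offs : List (List Nat))
    (hy : s0.toList.length = L) (hL : 0 < L)
    (hc : pvB_collect s0 L rest = some offs) :
    ∀ (shifts : List Nat), (∀ x ∈ shifts, x < L) →
      ∀ (acc : Option Int) (b : Int),
        ((acc = none ∧ b = -1) ∨ (∃ m, acc = some m ∧ b = m ∧ 0 ≤ m)) →
        (shifts ≠ [] ∨ acc ≠ none) →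
        pvA_outer s0 rest L shifts acc = pvB_best offs L shifts b := by
  intro shifts
  induction shifts with
  | nil =>
      rintro _ acc b hrel hnn
      rcases hrel with ⟨ha, hb⟩ | ⟨m, ha, hb, hm⟩
      · rcases hnn with h | h
        · exact absurd rfl h
        · exact absurd ha h
      · subst ha; subst hb; rfl
  | cons sh shifts ih =>
      intro hmem acc b hrel _
      have hsh : sh < L := hmem sh (List.mem_cons_self ..)
      simp only [pvA_outer, pvB_best]
      rw [inner_eq s0 L sh hy hL hsh rest ((sh : Nat) : Int), hc]
      simp only [Option.map_some]
      set total := offs.foldl (fun t' D => t' + ((pvB_minOff D sh L : Nat) : Int)) ((sh : Nat) : Int) with htot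
      have htnn : 0 ≤ total := foldl_total_nonneg offs sh L _ (by positivity)
      rcases hrel with ⟨rfl, rfl⟩ | ⟨m, rfl, hb, hm⟩
      · apply ih (fun x hx => hmem x (List.mem_cons_of_mem _ hx))
        · right
          refine ⟨total, rfl, ?_, htnn⟩
          rw [if_pos (Or.inl (by norm_num))]
        · right; simp
      · apply ih (fun x hx => hmem x (List.mem_cons_of_mem _ hx))
        · right
          refine ⟨min m total, rfl, ?_, le_min hm htnn⟩
          rw [hb]
          by_cases hcnd : m < 0 ∨ total < m
          · rw [if_pos hcnd]; omega
          · rw [if_neg hcnd]; omega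
        · right; simp

-- ===== VERDICT (by name: the statement is the Claim_ definition above) =====
theorem min_rotation_steps_spec : Claim_equal_min_rotation_steps := by
  intro strings _ hpre
  unfold Spec_min_rotation_steps
  obtain ⟨hne, hhd⟩ := hpre
  cases strings with
  | nil => exact absurd rfl hne
  | cons s0 rest =>
      have hs0 : s0 ≠ "" := by simpa using hhd
      have hL : 0 < s0.toList.length := by
        rcases Nat.eq_zero_or_pos s0.toList.length with h | h
        · exfalso
          apply hs0
          rw [← String.toList_inj]
          rw [List.length_eq_zero_iff] at h
          simpa using h
        · exact h
      simp only [min_rotation_steps, min_rotation_steps_alt]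
      cases hc : pvB_collect s0 s0.toList.length rest with
      | some offs =>
          exact outer_eq s0 rest s0.toList.length offs rfl hL hc (List.range s0.toList.length)
            (fun x hx => List.mem_range.mp hx) none (-1) (Or.inl ⟨rfl, rfl⟩)
            (Or.inl (by rw [ne_eq, List.range_eq_nil]; omega))
      | none =>
          obtain ⟨L', hL'⟩ : ∃ L', s0.toList.length = L' + 1 := ⟨s0.toList.length - 1, by omega⟩
          rw [hL', List.range_succ_eq_map]
          simp only [pvA_outer]
          rw [show ((0 : Nat) : Int) = ((0 : Nat) : Int) from rfl,
            inner_eq s0 (L' + 1) 0 (by omega) (by omega) (by omega) rest ((0 : Nat) : Int)]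
          rw [← hL', hc]
          rfl
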